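-- pv_equiv track=rewrite | github.com/paulo-n-alexandre/Foundations-of-Programming | finalProject.py | conjunto_palavras_para_cadeia
-- ===== SOURCE A (Python) =====
-- def subconjunto_por_tamanho(conjunto,n):
--     '''subconjunto_por_tamanho: conjunto_palavras x int -> list
--        subconjunto_por_tamanho(conjunto,n) devolve uma lista com
--        as palavras_potenciais de tamanho n contidas no conjunto_palavras.'''
--
--
--     subconjunto=[]
--
--     for i in conjunto:
--
--         if len(i)==n:
--             subconjunto.append(i)
--
--     subconjunto.sort()
--
--     return subconjunto
--
-- def conjunto_palavras_para_cadeia(conj):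
--     '''conjuntos_palavras_para_cadeia: conjunto_palavras -> str
--        conjuntos_palavras_para_cadeia(conj) devolve uma cadeia de carateres
--        que representa o conjunto, por ordem crescente de tamanho e alfabeticamente.'''
--
--
--     n=0
--     cadeia=""
--
--     for i in conj:
--         if len(i)>n:
--             n=len(i)
--
--     for i in range(n,-1,-1):
--         if subconjunto_por_tamanho(conj,i)!=[]:
--
--             if i==n:
--                 cadeia=str(i)+"->"+"["+str(", ".join(subconjunto_por_tamanho(conj,i)))+"]"+cadeia
--             else:
--                 cadeia=str(i)+"->"+"["+str(", ".join(subconjunto_por_tamanho(conj,i)))+"]"+";"+cadeia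
--
--     return "["+cadeia+"]"
-- ===== SOURCE B (Python) =====
-- def conjunto_palavras_para_cadeia(conj):
--     '''Single pass: bucket words by length in a dict, then emit each group
--        (sorted alphabetically) in ascending order of length.'''
--     grupos = {}
--     for p in conj:
--         grupos.setdefault(len(p), []).append(p)
--     partes = []
--     for n in sorted(grupos):
--         partes.append(str(n) + "->[" + ", ".join(sorted(grupos[n])) + "]")
--     return "[" + ";".join(partes) + "]"
-- ===== Notes on version B (the rewrite author's own statement) =====
-- stated objective: faster
-- what changed: A scans and sorts the whole list once per candidate length (twice per length, for every i from max length down to 0); B buckets the words by length into a dict in one pass and then emits each bucket sorted, visiting only the lengths actually present.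
import Mathlib
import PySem

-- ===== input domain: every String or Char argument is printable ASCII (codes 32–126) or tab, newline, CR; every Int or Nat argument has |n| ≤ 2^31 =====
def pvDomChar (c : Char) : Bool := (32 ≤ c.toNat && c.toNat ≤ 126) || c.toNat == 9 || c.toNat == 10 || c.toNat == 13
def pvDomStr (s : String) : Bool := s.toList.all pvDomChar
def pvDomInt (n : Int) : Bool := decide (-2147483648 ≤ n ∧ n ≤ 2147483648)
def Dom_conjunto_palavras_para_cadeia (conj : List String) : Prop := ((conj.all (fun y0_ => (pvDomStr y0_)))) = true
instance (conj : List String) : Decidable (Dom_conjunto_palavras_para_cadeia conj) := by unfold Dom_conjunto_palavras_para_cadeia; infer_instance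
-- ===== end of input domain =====

-- B replaces A's per-length rescans (filter + sort of the whole list for every length from max down to 0, twice each)
-- by one dict-bucketing pass followed by emitting each bucket sorted, in ascending key order: objective 'faster'.


-- ===== PORT A =====
def subconjunto_por_tamanho (conjunto : List String) (n : Int) : List String :=
  let subconjunto : List String :=
    conjunto.foldl (fun subconjunto i => if PySem.Str.len i == n then subconjunto ++ [i] else subconjunto) []
  PySem.List.sorted subconjunto (fun x => x)

def conjunto_palavras_para_cadeia (conj : List String) : String :=
  let n : Int := conj.foldl (fun n i => if PySem.Str.len i > n then PySem.Str.len i else n) 0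
  let cadeia : String :=
    (PySem.List.pyRange n (-1) (-1)).foldl (fun cadeia i =>
      if subconjunto_por_tamanho conj i ≠ [] then
        if i == n then
          PySem.Int.toStr i ++ "->" ++ "[" ++ PySem.Str.join ", " (subconjunto_por_tamanho conj i) ++ "]" ++ cadeia
        else
          PySem.Int.toStr i ++ "->" ++ "[" ++ PySem.Str.join ", " (subconjunto_por_tamanho conj i) ++ "]" ++ ";" ++ cadeia
      else cadeia) ""
  "[" ++ cadeia ++ "]"

-- ===== PORT B =====
def conjunto_palavras_para_cadeia_alt (conj : List String) : String :=
  let grupos : PySem.Dict Int (List String) :=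
    conj.foldl (fun grupos p => grupos.modify (PySem.Str.len p) [] (fun ws => ws ++ [p])) PySem.Dict.empty
  let partes : List String :=
    (PySem.List.sorted grupos.keys (fun x => x)).foldl (fun partes n =>
      partes ++ [PySem.Int.toStr n ++ "->[" ++
                 PySem.Str.join ", " (PySem.List.sorted (grupos.getD n []) (fun x => x)) ++ "]"]) []
  "[" ++ PySem.Str.join ";" partes ++ "]"

-- ===== PRECONDITION & SPEC =====
def Spec_conjunto_palavras_para_cadeia (conj : List String) (out : String) : Prop := out = conjunto_palavras_para_cadeia_alt conj
instance (conj : List String) (out : String) : Decidable (Spec_conjunto_palavras_para_cadeia conj out) := by unfold Spec_conjunto_palavras_para_cadeia; infer_instance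

-- ===== CLAIM (what is proved, stated in full; the proofs are below) =====
def Claim_equal_conjunto_palavras_para_cadeia : Prop := ∀ (conj : List String), Dom_conjunto_palavras_para_cadeia conj → Spec_conjunto_palavras_para_cadeia conj (conjunto_palavras_para_cadeia conj)

-- ===== LEMMAS AND PROOFS =====

-- the group of words of length i, as A computes it (filter in order, then sort)
def pvGroup (conj : List String) (i : Int) : List String :=
  conj.filter (fun w => PySem.Str.len w == i)

-- the string A contributes for length i
def pvEntry (conj : List String) (i : Int) : String :=
  PySem.Int.toStr i ++ "->" ++ "[" ++ PySem.Str.join ", " (subconjunto_por_tamanho conj i) ++ "]"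

-- "entry i1;entry i2;…;" — what A's descending loop accumulates for the lengths below the maximum
def pvCatSemi (conj : List String) : List Int → String
  | [] => ""
  | i :: t => pvEntry conj i ++ ";" ++ pvCatSemi conj t

theorem pvSub_eq (conj : List String) (i : Int) :
    subconjunto_por_tamanho conj i = PySem.List.sorted (pvGroup conj i) (fun x => x) := by
  unfold subconjunto_por_tamanho pvGroup
  rw [PySem.List.foldl_append_if_eq_filter (fun w => PySem.Str.len w == i) conj []]
  rfl

theorem pvStr_join_cons_cons (sep p q : String) (rest : List String) :
    PySem.Str.join sep (p :: q :: rest) = p ++ sep ++ PySem.Str.join sep (q :: rest) := by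
  apply String.toList_inj.mp
  simp [PySem.Str.toList_join, PySem.Chars.join_cons_cons]

theorem pvStr_join_singleton (sep p : String) : PySem.Str.join sep [p] = p := by
  apply String.toList_inj.mp
  simp [PySem.Str.toList_join, PySem.Chars.join_singleton]

theorem pvStr_join_nil (sep : String) : PySem.Str.join sep [] = "" := by
  apply String.toList_inj.mp
  simp [PySem.Str.toList_join, PySem.Chars.join_nil]

theorem pvCatSemi_append (conj : List String) (l m : List Int) :
    pvCatSemi conj (l ++ m) = pvCatSemi conj l ++ pvCatSemi conj m := by
  induction l with
  | nil => simp [pvCatSemi]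
  | cons a t ih => simp [pvCatSemi, ih, String.append_assoc]

theorem pvJoin_semi (conj : List String) (l : List Int) (x : Int) :
    PySem.Str.join ";" ((l ++ [x]).map (pvEntry conj)) = pvCatSemi conj l ++ pvEntry conj x := by
  induction l with
  | nil => simp [pvStr_join_singleton, pvCatSemi]
  | cons a t ih =>
    rw [List.cons_append, List.map_cons]
    have : ∃ h r, (t ++ [x]).map (pvEntry conj) = h :: r := by
      cases t with
      | nil => exact ⟨_, _, rfl⟩
      | cons b u => exact ⟨_, _, rfl⟩
    obtain ⟨h, r, hr⟩ := this
    rw [hr, pvStr_join_cons_cons, ← hr, ih]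
    simp [pvCatSemi, String.append_assoc]

-- ---- A's max-length fold ----

theorem pvMaxfold_init_le (conj : List String) (a : Int) :
    a ≤ conj.foldl (fun n i => if PySem.Str.len i > n then PySem.Str.len i else n) a := by
  induction conj generalizing a with
  | nil => simp
  | cons w t ih =>
    simp only [List.foldl_cons]
    split
    · exact le_trans (le_of_lt (by assumption)) (ih _)
    · exact ih _

theorem pvMaxfold_ge (conj : List String) (a : Int) :
    ∀ w ∈ conj, PySem.Str.len w ≤ conj.foldl (fun n i => if PySem.Str.len i > n then PySem.Str.len i else n) a := by
  induction conj generalizing a with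
  | nil => simp
  | cons v t ih =>
    intro w hw
    simp only [List.foldl_cons]
    rcases List.mem_cons.mp hw with h | h
    · subst h
      refine le_trans ?_ (pvMaxfold_init_le t _)
      split
      · exact le_refl _
      · omega
    · exact ih _ w h

theorem pvMaxfold_mem_or (conj : List String) (a : Int) :
    conj.foldl (fun n i => if PySem.Str.len i > n then PySem.Str.len i else n) a = a ∨
    conj.foldl (fun n i => if PySem.Str.len i > n then PySem.Str.len i else n) a ∈ conj.map PySem.Str.len := by
  induction conj generalizing a with
  | nil => simp
  | cons w t ih =>
    simp only [List.foldl_cons, List.map_cons]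
    split
    · rcases ih (PySem.Str.len w) with h | h
      · exact Or.inr (List.mem_cons.mpr (Or.inl h))
      · exact Or.inr (List.mem_cons.mpr (Or.inr h))
    · rcases ih a with h | h
      · exact Or.inl h
      · exact Or.inr (List.mem_cons.mpr (Or.inr h))

theorem pvLen_nonneg (w : String) : 0 ≤ PySem.Str.len w := by
  simp [PySem.Str.len_eq]

-- present lengths below k, ascending
def pvAscBelow (conj : List String) (k : Int) : List Int :=
  (PySem.List.pyRange 0 k).filter (fun i => ¬ (pvGroup conj i = []))

theorem pvAscBelow_succ (conj : List String) (k : Nat) :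
    pvAscBelow conj ((k : Int) + 1) =
      pvAscBelow conj k ++ (if ¬ (pvGroup conj (k : Int) = []) then [(k : Int)] else []) := by
  unfold pvAscBelow
  rw [PySem.List.pyRange_one_succ_right (by exact_mod_cast Nat.zero_le k)]
  rw [List.filter_append]
  congr 1
  split <;> simp_all

-- A's descending loop, characterised: fold over range(k-1, -1, -1) prepends pvEntry i ++ ";" for each present i < k
theorem pvDescFold (conj : List String) (n : Int) (k : Nat) (c : String) (hk : (k : Int) ≤ n) :
    (PySem.List.pyRange ((k : Int) - 1) (-1) (-1)).foldl (fun cadeia i =>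
      if subconjunto_por_tamanho conj i ≠ [] then
        if i == n then
          PySem.Int.toStr i ++ "->" ++ "[" ++ PySem.Str.join ", " (subconjunto_por_tamanho conj i) ++ "]" ++ cadeia
        else
          PySem.Int.toStr i ++ "->" ++ "[" ++ PySem.Str.join ", " (subconjunto_por_tamanho conj i) ++ "]" ++ ";" ++ cadeia
      else cadeia) c
    = pvCatSemi conj (pvAscBelow conj k) ++ c := by
  induction k generalizing c with
  | zero =>
    rw [PySem.List.pyRange_neg_one_eq_nil (by omega)]
    simp [pvAscBelow, pvCatSemi]
  | succ k ih =>
    push_cast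
    rw [show ((k : Int) + 1 - 1) = (k : Int) by ring]
    rw [PySem.List.pyRange_neg_one_cons (by omega), List.foldl_cons]
    rw [ih _ (by omega)]
    rw [pvAscBelow_succ conj k]
    rw [pvCatSemi_append]
    have hne : ((k : Int) == n) = false := by
      rw [beq_eq_false_iff_ne]
      omega
    rw [pvSub_eq]
    by_cases hp : pvGroup conj (k : Int) = []
    · simp [hp, pvCatSemi, PySem.List.sorted_eq_nil_iff]
    · have hs : ¬ (PySem.List.sorted (pvGroup conj (k : Int)) (fun x => x) = []) := by
        simpa [PySem.List.sorted_eq_nil_iff] using hp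
      simp only [if_pos hs, hne, Bool.false_eq_true, if_false]
      rw [if_pos hp]
      simp [pvCatSemi, pvEntry, pvSub_eq, String.append_assoc]

-- ---- B's dict of groups ----

theorem pvGetD_groups (conj : List String) (d : PySem.Dict Int (List String)) (i : Int) :
    (conj.foldl (fun grupos p => grupos.modify (PySem.Str.len p) [] (fun ws => ws ++ [p])) d).getD i []
      = d.getD i [] ++ pvGroup conj i := by
  induction conj generalizing d with
  | nil => simp [pvGroup]
  | cons w t ih =>
    simp only [List.foldl_cons]
    rw [ih]
    unfold pvGroup
    by_cases h : i = PySem.Str.len w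
    · rw [List.filter_cons_of_pos (by simp [h]), PySem.Dict.getD_modify, if_pos h]
      subst h
      simp [pvGroup, List.append_assoc]
    · rw [List.filter_cons_of_neg (by simp only [beq_iff_eq]; exact fun hh => h hh.symm), PySem.Dict.getD_modify, if_neg h]

theorem pvKeys_groups (conj : List String) :
    (conj.foldl (fun grupos p => grupos.modify (PySem.Str.len p) [] (fun ws => ws ++ [p])) PySem.Dict.empty).keys
      = PySem.Set.ofList (conj.map PySem.Str.len) := by
  rw [PySem.Dict.keys_foldl_modify_key conj PySem.Str.len [] (fun _ p ws => ws ++ [p]) PySem.Dict.empty]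
  rw [PySem.Dict.keys_empty]
  rfl

-- present lengths ↔ membership in the length list
theorem pvGroup_ne_iff (conj : List String) (i : Int) :
    ¬ (pvGroup conj i = []) ↔ i ∈ conj.map PySem.Str.len := by
  unfold pvGroup
  rw [List.filter_eq_nil_iff]
  push_neg
  constructor
  · rintro ⟨w, hw, h⟩
    exact List.mem_map.mpr ⟨w, hw, by simpa [eq_comm] using (beq_iff_eq.mp h)⟩
  · rintro h
    obtain ⟨w, hw, h⟩ := List.mem_map.mp h
    exact ⟨w, hw, by simpa using h⟩

-- the sorted distinct lengths: ascending present lengths below the max, then the max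
theorem pvSortedKeys (conj : List String) (n : Int)
    (hmax : ∀ w ∈ conj, PySem.Str.len w ≤ n) (hmem : n ∈ conj.map PySem.Str.len) :
    PySem.List.sorted (PySem.Set.ofList (conj.map PySem.Str.len)) (fun x => x)
      = pvAscBelow conj n ++ [n] := by
  apply PySem.List.sorted_eq_of_perm_of_pairwise_lt
  · -- permutation: both are nodup with the same members
    have hnd1 : (pvAscBelow conj n ++ [n]).Nodup := by
      have hpw : (pvAscBelow conj n).Pairwise (· < ·) :=
        List.Pairwise.filter _ (PySem.List.pairwise_lt_pyRange_one 0 n)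
      have hlt : ∀ i ∈ pvAscBelow conj n, i < n := by
        intro i hi
        have := List.mem_filter.mp hi
        exact (PySem.List.mem_pyRange_one.mp this.1).2
      refine List.Nodup.append (hpw.imp ne_of_lt) (List.nodup_singleton n) ?_
      intro i hi hj
      rw [List.mem_singleton] at hj
      exact ne_of_lt (hlt i hi) hj
    refine (List.perm_ext_iff_of_nodup hnd1 (PySem.Set.nodup_ofList _)).mpr ?_
    intro i
    rw [PySem.Set.mem_ofList, List.mem_append, List.mem_singleton]
    constructor
    · rintro (hi | rfl)
      · have := List.mem_filter.mp hi
        exact (pvGroup_ne_iff conj i).mp (by simpa using this.2)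
      · exact hmem
    · intro hi
      by_cases h : i = n
      · exact Or.inr h
      · refine Or.inl (List.mem_filter.mpr ⟨?_, by simpa using (pvGroup_ne_iff conj i).mpr hi⟩)
        obtain ⟨w, hw, rfl⟩ := List.mem_map.mp hi
        exact PySem.List.mem_pyRange_one.mpr ⟨pvLen_nonneg w, lt_of_le_of_ne (hmax w hw) h⟩
  · -- strictly ascending
    have hpw : (pvAscBelow conj n).Pairwise (· < ·) :=
      List.Pairwise.filter _ (PySem.List.pairwise_lt_pyRange_one 0 n)
    rw [List.pairwise_append]
    refine ⟨hpw, List.pairwise_singleton _ _, ?_⟩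
    intro i hi j hj
    rw [List.mem_singleton] at hj
    subst hj
    exact (PySem.List.mem_pyRange_one.mp (List.mem_filter.mp hi).1).2

-- B's entry for a length equals A's
theorem pvEntryB_eq (conj : List String) (i : Int) :
    PySem.Int.toStr i ++ "->[" ++
      PySem.Str.join ", " (PySem.List.sorted
        ((conj.foldl (fun grupos p => grupos.modify (PySem.Str.len p) [] (fun ws => ws ++ [p]))
          PySem.Dict.empty).getD i []) (fun x => x)) ++ "]"
    = pvEntry conj i := by
  rw [pvGetD_groups conj PySem.Dict.empty i]
  unfold pvEntry
  rw [pvSub_eq]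
  have h : PySem.Int.toStr i ++ "->[" = PySem.Int.toStr i ++ "->" ++ "[" := by
    rw [String.append_assoc]
    congr 1
  rw [h]
  simp [PySem.Dict.getD_empty]

-- ===== VERDICT (by name: the statement is the Claim_ definition above) =====
theorem conjunto_palavras_para_cadeia_spec : Claim_equal_conjunto_palavras_para_cadeia := by
  intro conj _
  unfold Spec_conjunto_palavras_para_cadeia conjunto_palavras_para_cadeia conjunto_palavras_para_cadeia_alt
  simp only []
  rw [pvKeys_groups conj]
  rw [PySem.List.foldl_append_singleton_eq_map
        (fun n => PySem.Int.toStr n ++ "->[" ++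
          PySem.Str.join ", " (PySem.List.sorted
            ((conj.foldl (fun grupos p => grupos.modify (PySem.Str.len p) [] (fun ws => ws ++ [p]))
              PySem.Dict.empty).getD n []) (fun x => x)) ++ "]")]
  simp only [List.nil_append]
  have hmapentry : ∀ l : List Int,
      l.map (fun n => PySem.Int.toStr n ++ "->[" ++
          PySem.Str.join ", " (PySem.List.sorted
            ((conj.foldl (fun grupos p => grupos.modify (PySem.Str.len p) [] (fun ws => ws ++ [p]))
              PySem.Dict.empty).getD n []) (fun x => x)) ++ "]") = l.map (pvEntry conj) := by
    intro l
    apply List.map_congr_left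
    intro i _
    exact pvEntryB_eq conj i
  set n : Int := conj.foldl (fun n i => if PySem.Str.len i > n then PySem.Str.len i else n) 0 with hn
  rcases eq_or_ne conj [] with rfl | hne
  · -- empty input: both sides are "[]"
    simp only [hn, List.foldl_nil]
    rw [PySem.List.pyRange_neg_one_cons (by omega), PySem.List.pyRange_neg_one_eq_nil (by omega)]
    have h1 : subconjunto_por_tamanho [] 0 = [] := rfl
    have h2 : PySem.List.sorted (PySem.Set.ofList (List.map PySem.Str.len [])) (fun x => x) = ([] : List Int) := rfl
    rw [h2, List.map_nil, pvStr_join_nil]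
    simp [h1]
  · -- nonempty input
    have h0 : 0 ≤ n := pvMaxfold_init_le conj 0
    have hmax : ∀ w ∈ conj, PySem.Str.len w ≤ n := pvMaxfold_ge conj 0
    have hmem : n ∈ conj.map PySem.Str.len := by
      rcases pvMaxfold_mem_or conj 0 with h | h
      · rw [← hn] at h
        rw [h]
        obtain ⟨w, hw⟩ := List.exists_mem_of_ne_nil conj hne
        have h1 := hmax w hw
        have h2 := pvLen_nonneg w
        have : PySem.Str.len w = 0 := by omega
        exact List.mem_map.mpr ⟨w, hw, this⟩
      · exact h
    rw [hmapentry, pvSortedKeys conj n hmax hmem, pvJoin_semi]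
    -- now the A side
    rw [PySem.List.pyRange_neg_one_cons (by omega), List.foldl_cons]
    have hpres : ¬ (subconjunto_por_tamanho conj n = []) := by
      rw [pvSub_eq, PySem.List.sorted_eq_nil_iff]
      exact (pvGroup_ne_iff conj n).mpr hmem
    rw [if_pos hpres, if_pos (beq_self_eq_true n)]
    have hk : ((n.toNat : Int)) = n := Int.toNat_of_nonneg h0
    rw [show n - 1 = ((n.toNat : Int)) - 1 by omega]
    rw [pvDescFold conj n n.toNat _ (by omega)]
    have hasc : pvAscBelow conj ((n.toNat : Int)) = pvAscBelow conj n := by rw [hk]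
    rw [hasc]
    simp [pvEntry, String.append_assoc]
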